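-- pv_equiv track=rewrite | github.com/mohanrajanr/AdventOfCode2020 | 4/passport.py | validate_pid
-- ===== SOURCE A (Python) =====
-- def validate_pid(value_given):
--     nums = ['0', '1', '2', '3', '4', '5', '6', '7', '8', '9']
--     if len(value_given) != 9:
--         return False
--
--     for v in value_given:
--         if v not in nums:
--             return False
--
--     return True
-- ===== SOURCE B (Python) =====
-- import re
--
-- def validate_pid(value_given):
--     return bool(re.fullmatch(r'[0-9]{9}', value_given))
-- ===== Notes on version B (the rewrite author's own statement) =====
-- stated objective: idiomatic
-- what changed: Replaces the length guard plus per-character membership loop over a digit list with a single regex fullmatch against [0-9]{9}.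
import Mathlib
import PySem

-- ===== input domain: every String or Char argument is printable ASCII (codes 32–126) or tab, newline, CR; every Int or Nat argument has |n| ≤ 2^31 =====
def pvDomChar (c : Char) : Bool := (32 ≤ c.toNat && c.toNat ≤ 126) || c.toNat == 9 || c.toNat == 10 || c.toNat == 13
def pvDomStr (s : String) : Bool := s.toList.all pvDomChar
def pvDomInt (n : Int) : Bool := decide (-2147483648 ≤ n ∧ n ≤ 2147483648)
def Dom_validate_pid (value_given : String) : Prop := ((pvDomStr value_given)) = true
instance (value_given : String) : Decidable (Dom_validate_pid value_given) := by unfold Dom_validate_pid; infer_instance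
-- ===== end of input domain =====

-- B replaces A's length guard + per-character membership loop with a single regex
-- fullmatch against [0-9]{9} (ported as a matcher consuming nine digit-class chars); objective: idiomatic.

-- ===== PORT A =====
-- loop 'for v in value_given: if v not in nums: return False' with early return
def validate_pid_loop (nums : List Char) : List Char → Bool
  | [] => true
  | v :: rest => if !(nums.contains v) then false else validate_pid_loop nums rest

def validate_pid (value_given : String) : Bool :=
  let nums : List Char := ['0','1','2','3','4','5','6','7','8','9']
  if PySem.Str.len value_given ≠ 9 then false
  else validate_pid_loop nums value_given.toList

-- ===== PORT B =====
-- regex matcher for the pattern [0-9]{n}: consume n characters of the class [0-9], then require end of input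
def validate_pid_matchDigits : Nat → List Char → Bool
  | 0, [] => true
  | 0, _ :: _ => false
  | _ + 1, [] => false
  | n + 1, c :: cs => if '0' ≤ c && c ≤ '9' then validate_pid_matchDigits n cs else false

def validate_pid_alt (value_given : String) : Bool :=
  validate_pid_matchDigits 9 value_given.toList

-- ===== PRECONDITION & SPEC =====
def Spec_validate_pid (value_given : String) (out : Bool) : Prop := out = validate_pid_alt value_given
instance (value_given : String) (out : Bool) : Decidable (Spec_validate_pid value_given out) := by unfold Spec_validate_pid; infer_instance

-- ===== CLAIM (what is proved, stated in full; the proofs are below) =====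
def Claim_equal_validate_pid : Prop := ∀ (value_given : String), Dom_validate_pid value_given → Spec_validate_pid value_given (validate_pid value_given)

-- ===== LEMMAS AND PROOFS =====

theorem char_eq_iff_toNat (c d : Char) : c = d ↔ c.toNat = d.toNat := by
  rw [Char.ext_iff, ← UInt32.toNat_inj]; rfl

theorem char_le_iff_toNat (c d : Char) : (c ≤ d) ↔ c.toNat ≤ d.toNat := by
  rw [Char.le_def, UInt32.le_iff_toNat_le]; rfl

theorem mem_nums_iff_digit (c : Char) :
    (['0','1','2','3','4','5','6','7','8','9'] : List Char).contains c = ('0' ≤ c && c ≤ '9') := by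
  rw [List.contains_eq_mem, show ('0' ≤ c && c ≤ '9') = decide ('0' ≤ c ∧ c ≤ '9') by simp,
    decide_eq_decide]
  simp only [List.mem_cons, List.not_mem_nil, or_false, char_eq_iff_toNat, char_le_iff_toNat,
    show ('0':Char).toNat = 48 from rfl, show ('1':Char).toNat = 49 from rfl,
    show ('2':Char).toNat = 50 from rfl, show ('3':Char).toNat = 51 from rfl,
    show ('4':Char).toNat = 52 from rfl, show ('5':Char).toNat = 53 from rfl,
    show ('6':Char).toNat = 54 from rfl, show ('7':Char).toNat = 55 from rfl,
    show ('8':Char).toNat = 56 from rfl, show ('9':Char).toNat = 57 from rfl]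
  omega

theorem loop_eq_match (cs : List Char) :
    validate_pid_loop ['0','1','2','3','4','5','6','7','8','9'] cs =
      validate_pid_matchDigits cs.length cs := by
  induction cs with
  | nil => rfl
  | cons c cs ih =>
    simp only [validate_pid_loop, validate_pid_matchDigits, List.length_cons, mem_nums_iff_digit]
    cases h : ('0' ≤ c && c ≤ '9') <;> simp [ih]

theorem match_of_len_ne (cs : List Char) (n : Nat) (h : cs.length ≠ n) :
    validate_pid_matchDigits n cs = false := by
  induction cs generalizing n with
  | nil => cases n with
    | zero => simp at h
    | succ n => rfl
  | cons c cs ih =>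
    cases n with
    | zero => rfl
    | succ n =>
      simp only [validate_pid_matchDigits]
      split
      · exact ih n (by simpa using h)
      · rfl

-- ===== VERDICT (by name: the statement is the Claim_ definition above) =====
theorem validate_pid_spec : Claim_equal_validate_pid := by
  intro s _
  unfold Spec_validate_pid validate_pid validate_pid_alt
  rw [PySem.Str.len_eq]
  by_cases h : s.toList.length = 9
  · rw [if_neg (by exact_mod_cast not_not.mpr h), loop_eq_match, h]
  · rw [if_pos (by exact_mod_cast h)]
    exact (match_of_len_ne _ _ h).symm
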